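-- pv_equiv track=rewrite | github.com/Talador12/code-music | code_music/theory.py | detect_key
-- ===== SOURCE A (Python) =====
-- _NOTE_NAMES = ["C", "C#", "D", "Eb", "E", "F", "F#", "G", "Ab", "A", "Bb", "B"]
--
-- _NOTE_TO_SEMI = {n: i for i, n in enumerate(_NOTE_NAMES)}
--
-- def _semi(note: str) -> int:
--     return _NOTE_TO_SEMI[note]
--
-- _SCALE_INTERVALS = {
--     "major": [0, 2, 4, 5, 7, 9, 11],
--     "dorian": [0, 2, 3, 5, 7, 9, 10],
--     "phrygian": [0, 1, 3, 5, 7, 8, 10],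
--     "lydian": [0, 2, 4, 6, 7, 9, 11],
--     "mixolydian": [0, 2, 4, 5, 7, 9, 10],
--     "aeolian": [0, 2, 3, 5, 7, 8, 10],
--     "locrian": [0, 1, 3, 5, 6, 8, 10],
--     "melodic_minor": [0, 2, 3, 5, 7, 9, 11],
--     "harmonic_minor": [0, 2, 3, 5, 7, 8, 11],
--     "whole_tone": [0, 2, 4, 6, 8, 10],
--     "diminished": [0, 2, 3, 5, 6, 8, 9, 11],  # half-whole
--     "blues": [0, 3, 5, 6, 7, 10],
--     "pentatonic": [0, 2, 4, 7, 9],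
--     "pentatonic_minor": [0, 3, 5, 7, 10],
-- }
--
-- def detect_key(
--     progression: list[tuple[str, str]],
-- ) -> str:
--     """Estimate the key of a chord progression by pitch-class frequency.
--
--     Counts how often each pitch class appears as a chord root and
--     matches against major-key diatonic sets. The key whose diatonic
--     set best covers the progression roots wins.
--
--     Args:
--         progression: List of (root, shape) tuples.
--
--     Returns:
--         Estimated key root (e.g. 'C', 'G').
--     """
--     root_counts: list[int] = [0] * 12
--     for root, _ in progression:
--         root_counts[_semi(root)] += 1
--
--     major_intervals = _SCALE_INTERVALS["major"]
--     best_key = 0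
--     best_score = -1
--
--     for candidate in range(12):
--         diatonic = {(candidate + iv) % 12 for iv in major_intervals}
--         score = sum(root_counts[pc] for pc in diatonic)
--         # Tiebreaker: prefer key whose root appears most often
--         if score > best_score or (
--             score == best_score and root_counts[candidate] > root_counts[best_key]
--         ):
--             best_score = score
--             best_key = candidate
--
--     return _NOTE_NAMES[best_key]
-- ===== SOURCE B (Python) =====
-- _NOTE_NAMES = ["C", "C#", "D", "Eb", "E", "F", "F#", "G", "Ab", "A", "Bb", "B"]
--
-- _NOTE_TO_SEMI = {n: i for i, n in enumerate(_NOTE_NAMES)}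
--
-- _MAJOR_INTERVALS = [0, 2, 4, 5, 7, 9, 11]
--
-- # Static table: for each note name, the 7 keys whose major scale contains it.
-- _KEYS_FOR = {
--     name: [(pc - iv) % 12 for iv in _MAJOR_INTERVALS]
--     for name, pc in _NOTE_TO_SEMI.items()
-- }
--
--
-- def detect_key(progression):
--     """Fused single pass: each chord root bumps, via the static note->keys
--     table, the score of every compatible key (no histogram-then-score stage);
--     the winner is the first lexicographic (score, root_count) maximum."""
--     scores = [0] * 12
--     root_counts = [0] * 12
--     for root, _ in progression:
--         root_counts[_NOTE_TO_SEMI[root]] += 1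
--         for k in _KEYS_FOR[root]:
--             scores[k] += 1
--     best = max(range(12), key=lambda c: (scores[c], root_counts[c]))
--     return _NOTE_NAMES[best]
-- ===== Notes on version B (the rewrite author's own statement) =====
-- stated objective: alternative
-- what changed: A stages a histogram pass and then, for each of 12 candidate keys, rebuilds a diatonic pitch-class set and re-sums counts with a running best_score accumulator; B has no histogram-then-score stage: one fused pass over the progression bumps, through a precomputed static note->compatible-keys table, the scores of the 7 keys containing each chord root, and the winner is picked by a lexicographic (score, root_count) first-maximum.
import Mathlib
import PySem

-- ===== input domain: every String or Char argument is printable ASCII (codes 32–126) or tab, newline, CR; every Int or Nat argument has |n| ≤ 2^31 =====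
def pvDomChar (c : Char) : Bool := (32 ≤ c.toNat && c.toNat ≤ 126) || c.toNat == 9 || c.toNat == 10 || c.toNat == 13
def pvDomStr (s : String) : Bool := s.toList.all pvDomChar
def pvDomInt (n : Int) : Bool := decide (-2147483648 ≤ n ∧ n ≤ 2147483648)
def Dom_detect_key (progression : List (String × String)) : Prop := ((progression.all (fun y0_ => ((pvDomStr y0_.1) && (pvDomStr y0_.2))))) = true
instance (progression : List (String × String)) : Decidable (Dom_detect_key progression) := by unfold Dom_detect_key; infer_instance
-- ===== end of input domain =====

-- B replaces A's histogram-then-score staging (per-candidate diatonic-set rebuild + running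
-- best_score) with ONE fused pass over the progression that bumps, via a precomputed static
-- note->compatible-keys table, the scores of the 7 keys containing each chord root, then one
-- lexicographic (score, root_count) first-maximum scan.

-- shared module constants (_NOTE_NAMES, _NOTE_TO_SEMI, major intervals)
def pvNoteNames : List String := ["C", "C#", "D", "Eb", "E", "F", "F#", "G", "Ab", "A", "Bb", "B"]

def pvNoteToSemi : PySem.Dict String Int :=
  PySem.Dict.ofList ((PySem.List.enumerate pvNoteNames).map (fun p => (p.2, p.1)))

-- _semi: dict lookup; total via getD 0 — under Pre_ the key is always present (KeyError excluded by Pre_)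
def pvSemi (note : String) : Int := (PySem.Dict.get? pvNoteToSemi note).getD 0

def pvMajor : List Int := [0, 2, 4, 5, 7, 9, 11]

-- list indexing, total via default 0 — every index used is 0..11 into length-12 lists
def pvGet0 (xs : List Int) (i : Int) : Int := PySem.List.pyGetD xs i 0

-- ===== PORT A =====
def pvCountsA (progression : List (String × String)) : List Int :=
  progression.foldl
    (fun rc rs => PySem.List.pySetD rc (pvSemi rs.1) (pvGet0 rc (pvSemi rs.1) + 1))
    (List.replicate 12 0)

-- score = sum(root_counts[pc] for pc in diatonic); sum over a set is order-independent
def pvScoreA (rc : List Int) (candidate : Int) : Int :=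
  ((PySem.Set.ofList (pvMajor.map (fun iv => PySem.Int.mod (candidate + iv) 12))).map
    (fun pc => pvGet0 rc pc)).sum

def detect_key (progression : List (String × String)) : String :=
  let rc := pvCountsA progression
  let res := (PySem.List.pyRange 0 12 1).foldl
    (fun (st : Int × Int) candidate =>
      if pvScoreA rc candidate > st.2 ∨
         (pvScoreA rc candidate = st.2 ∧ pvGet0 rc candidate > pvGet0 rc st.1)
      then (candidate, pvScoreA rc candidate) else st)
    (0, -1)
  PySem.List.pyGetD pvNoteNames res.1 ""

-- ===== PORT B =====
-- _KEYS_FOR = {name: [(pc - iv) % 12 for iv in _MAJOR_INTERVALS] for name, pc in _NOTE_TO_SEMI.items()}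
def pvKeysForD : PySem.Dict String (List Int) :=
  PySem.Dict.ofList ((PySem.Dict.items pvNoteToSemi).map
    (fun q => (q.1, pvMajor.map (fun iv => PySem.Int.mod (q.2 - iv) 12))))

-- _KEYS_FOR[root]: total via getD [] — under Pre_ the key is always present
def pvKeysFor (root : String) : List Int := (PySem.Dict.get? pvKeysForD root).getD []

-- the fused loop: one pass over the progression updating (scores, root_counts)
def pvFused (progression : List (String × String)) : List Int × List Int :=
  progression.foldl
    (fun st rs =>
      ((pvKeysFor rs.1).foldl (fun sc k => PySem.List.pySetD sc k (pvGet0 sc k + 1)) st.1,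
       PySem.List.pySetD st.2 (pvSemi rs.1) (pvGet0 st.2 (pvSemi rs.1) + 1)))
    (List.replicate 12 0, List.replicate 12 0)

-- max(range(12), key=lambda c: (scores[c], root_counts[c])): first maximizer
def detect_key_alt (progression : List (String × String)) : String :=
  let st := pvFused progression
  let best := (PySem.List.pyRange 1 12 1).foldl
    (fun b c =>
      if pvGet0 st.1 c > pvGet0 st.1 b ∨
         (pvGet0 st.1 c = pvGet0 st.1 b ∧ pvGet0 st.2 c > pvGet0 st.2 b)
      then c else b)
    0
  PySem.List.pyGetD pvNoteNames best ""

-- ===== PRECONDITION & SPEC =====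
-- Pre_ excludes exactly the progressions with a chord root outside _NOTE_NAMES, on which A raises KeyError.
def Pre_detect_key (progression : List (String × String)) : Prop :=
  ∀ rs ∈ progression, rs.1 ∈ pvNoteNames
instance (progression : List (String × String)) : Decidable (Pre_detect_key progression) := by
  unfold Pre_detect_key; infer_instance

def pvWitness_detect_key : (List (String × String)) := [("C", "maj"), ("G", "7"), ("A", "min")]

def Spec_detect_key (progression : List (String × String)) (out : String) : Prop := out = detect_key_alt progression
instance (progression : List (String × String)) (out : String) : Decidable (Spec_detect_key progression out) := by unfold Spec_detect_key; infer_instance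

-- ===== CLAIM (what is proved, stated in full; the proofs are below) =====
def Claim_equal_detect_key : Prop := ∀ (progression : List (String × String)), Dom_detect_key progression → Pre_detect_key progression → Spec_detect_key progression (detect_key progression)

-- ===== LEMMAS AND PROOFS =====

-- total indexing into an updated list: pyGetD after pySetD at in-range indices
theorem get_set (xs : List Int) (i c : Int) (v d : Int) (hi : 0 ≤ i) (hc : 0 ≤ c) (hc2 : c < xs.length) :
    PySem.List.pyGetD (PySem.List.pySetD xs i v) c d = if c = i then v else PySem.List.pyGetD xs c d := by
  rw [PySem.List.pySetD_of_nonneg xs v hi,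
    PySem.List.pyGetD_eq_getElem (xs.set i.toNat v) d hc (by simpa using hc2),
    PySem.List.pyGetD_eq_getElem xs d hc hc2,
    List.getElem_set]
  split_ifs with h1 h2 h2 <;> first | rfl | omega

-- how many major-scale intervals of candidate key c are hit by pitch class pc
def pvMult (pc c : Int) : Int := ((pvMajor.filter (fun iv => PySem.Int.mod (pc - iv) 12 = c)).length : Int)

-- the 12 pitch classes, and the score expressed as a mult-weighted sum over them
def pvPCs : List Int := [0,1,2,3,4,5,6,7,8,9,10,11]

def pvS (rc : List Int) (c : Int) : Int := (pvPCs.map (fun pc => pvMult pc c * pvGet0 rc pc)).sum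

theorem semi_bounds (s : String) : 0 ≤ pvSemi s ∧ pvSemi s < 12 := by
  rw [pvSemi]
  rcases hg : PySem.Dict.get? pvNoteToSemi s with _ | v
  · simp
  · have hv : v ∈ pvNoteToSemi.values := by
      have := PySem.Dict.mem_items_of_get?_eq_some pvNoteToSemi hg
      exact List.mem_map_of_mem this
    have hall : ∀ w ∈ pvNoteToSemi.values, 0 ≤ w ∧ w < 12 := by decide
    simpa using hall v hv

-- B's table agrees with the comprehension it was built from, on every valid note name
theorem keysFor_eq : ∀ r ∈ pvNoteNames,
    pvKeysFor r = pvMajor.map (fun iv => PySem.Int.mod (pvSemi r - iv) 12) := by decide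

theorem keysFor_bounds (r : String) (hr : r ∈ pvNoteNames) :
    ∀ k ∈ pvKeysFor r, 0 ≤ k ∧ k < 12 := by
  intro k hk
  rw [keysFor_eq r hr] at hk
  rcases List.mem_map.mp hk with ⟨iv, _, rfl⟩
  exact ⟨PySem.Int.mod_nonneg _ (by norm_num), PySem.Int.mod_lt _ (by norm_num)⟩

theorem keys_count (s c : Int) :
    (((pvMajor.map (fun iv => PySem.Int.mod (s - iv) 12)).filter (fun k => decide (k = c))).length : Int)
      = pvMult s c := by
  rw [pvMult, List.filter_map, List.length_map]
  rfl

-- the inner per-chord loop: length preserved, and each entry gains the multiplicity of c in ks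
theorem innerB_len (ks : List Int) (sc : List Int) :
    (ks.foldl (fun sc k => PySem.List.pySetD sc k (pvGet0 sc k + 1)) sc).length = sc.length := by
  induction ks generalizing sc with
  | nil => rfl
  | cons k ks ih => simp only [List.foldl_cons]; rw [ih]; simp [PySem.List.length_pySetD]

theorem innerB_get (ks : List Int) (hks : ∀ k ∈ ks, 0 ≤ k ∧ k < 12) (sc : List Int)
    (hsc : sc.length = 12) (c : Int) (hc0 : 0 ≤ c) (hc1 : c < 12) :
    pvGet0 (ks.foldl (fun sc k => PySem.List.pySetD sc k (pvGet0 sc k + 1)) sc) c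
      = pvGet0 sc c + ((ks.filter (fun k => decide (k = c))).length : Int) := by
  induction ks generalizing sc with
  | nil => simp
  | cons k ks ih =>
    have hk := hks k (List.mem_cons_self ..)
    simp only [List.foldl_cons, List.filter_cons]
    rw [ih (fun x hx => hks x (List.mem_cons_of_mem _ hx)) _
      (by rw [PySem.List.length_pySetD]; exact hsc)]
    have hget : pvGet0 (PySem.List.pySetD sc k (pvGet0 sc k + 1)) c
        = if c = k then pvGet0 sc k + 1 else pvGet0 sc c := by
      simp only [pvGet0]
      exact get_set sc k c _ 0 hk.1 hc0 (by omega)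
    rw [hget]
    by_cases h : k = c
    · rw [if_pos h.symm]; simp only [h, decide_true, if_true, List.length_cons]; push_cast; ring
    · rw [if_neg (fun hh => h hh.symm), if_neg (by simpa using h)]

-- the fused fold: second component is exactly A's histogram fold
theorem fused_snd (l : List (String × String)) (sc rc : List Int) :
    (l.foldl
      (fun st rs =>
        ((pvKeysFor rs.1).foldl (fun sc k => PySem.List.pySetD sc k (pvGet0 sc k + 1)) st.1,
         PySem.List.pySetD st.2 (pvSemi rs.1) (pvGet0 st.2 (pvSemi rs.1) + 1)))
      (sc, rc)).2
    = l.foldl (fun rc rs => PySem.List.pySetD rc (pvSemi rs.1) (pvGet0 rc (pvSemi rs.1) + 1)) rc := by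
  induction l generalizing sc rc with
  | nil => rfl
  | cons rs l ih => simp only [List.foldl_cons]; exact ih _ _

-- the fused fold: first component accumulates per-chord multiplicities
theorem fused_fst (l : List (String × String)) (hl : ∀ rs ∈ l, rs.1 ∈ pvNoteNames)
    (sc rc : List Int) (hsc : sc.length = 12) (c : Int) (hc0 : 0 ≤ c) (hc1 : c < 12) :
    pvGet0 (l.foldl
      (fun st rs =>
        ((pvKeysFor rs.1).foldl (fun sc k => PySem.List.pySetD sc k (pvGet0 sc k + 1)) st.1,
         PySem.List.pySetD st.2 (pvSemi rs.1) (pvGet0 st.2 (pvSemi rs.1) + 1)))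
      (sc, rc)).1 c
    = pvGet0 sc c + (l.map (fun rs => pvMult (pvSemi rs.1) c)).sum := by
  induction l generalizing sc rc with
  | nil => simp
  | cons rs l ih =>
    have hr := hl rs (List.mem_cons_self ..)
    simp only [List.foldl_cons, List.map_cons, List.sum_cons]
    rw [ih (fun x hx => hl x (List.mem_cons_of_mem _ hx)) _ _ (by rw [innerB_len]; exact hsc),
      innerB_get _ (keysFor_bounds rs.1 hr) sc hsc c hc0 hc1,
      keysFor_eq rs.1 hr, keys_count]
    ring

-- weighted sum over all pitch classes after one histogram bump
theorem sum_map_mult_set (pcs : List Int) (hnd : pcs.Nodup)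
    (hpcs : ∀ pc ∈ pcs, 0 ≤ pc ∧ pc < 12) (rc : List Int) (hrc : rc.length = 12)
    (s : Int) (hs0 : 0 ≤ s) (hs1 : s < 12) (c : Int) :
    (pcs.map (fun pc => pvMult pc c * pvGet0 (PySem.List.pySetD rc s (pvGet0 rc s + 1)) pc)).sum
      = (pcs.map (fun pc => pvMult pc c * pvGet0 rc pc)).sum + (if s ∈ pcs then pvMult s c else 0) := by
  induction pcs with
  | nil => simp
  | cons pc pcs ih =>
    have hpc := hpcs pc (List.mem_cons_self ..)
    simp only [List.map_cons, List.sum_cons, List.mem_cons]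
    have hget : pvGet0 (PySem.List.pySetD rc s (pvGet0 rc s + 1)) pc
        = if pc = s then pvGet0 rc s + 1 else pvGet0 rc pc := by
      simp only [pvGet0]
      exact get_set rc s pc _ 0 hs0 hpc.1 (by omega)
    rw [hget, ih (List.nodup_cons.mp hnd).2 (fun x hx => hpcs x (List.mem_cons_of_mem _ hx))]
    by_cases h : pc = s
    · subst h
      have hnotin : pc ∉ pcs := (List.nodup_cons.mp hnd).1
      rw [if_pos rfl, if_neg hnotin, if_pos (Or.inl rfl)]
      ring
    · rw [if_neg h]
      by_cases h2 : s ∈ pcs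
      · rw [if_pos h2, if_pos (Or.inr h2)]; ring
      · rw [if_neg h2, if_neg (by rintro (rfl | hh) <;> [exact h rfl; exact h2 hh])]; ring

-- regrouping the histogram-weighted sum by the chords that built it
theorem S_counts (l : List (String × String)) (rc : List Int) (hrc : rc.length = 12) (c : Int) :
    pvS (l.foldl (fun rc rs => PySem.List.pySetD rc (pvSemi rs.1) (pvGet0 rc (pvSemi rs.1) + 1)) rc) c
      = pvS rc c + (l.map (fun rs => pvMult (pvSemi rs.1) c)).sum := by
  induction l generalizing rc with
  | nil => simp
  | cons rs l ih =>
    have hs := semi_bounds rs.1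
    simp only [List.foldl_cons, List.map_cons, List.sum_cons]
    rw [ih _ (by rw [PySem.List.length_pySetD]; exact hrc)]
    have hmem : pvSemi rs.1 ∈ pvPCs := by
      have h0 := hs.1; have h1 := hs.2
      interval_cases h : pvSemi rs.1 <;> decide
    rw [show pvS (PySem.List.pySetD rc (pvSemi rs.1) (pvGet0 rc (pvSemi rs.1) + 1)) c
        = pvS rc c + pvMult (pvSemi rs.1) c from by
      rw [pvS, pvS, sum_map_mult_set pvPCs (by decide) (by decide) rc hrc _ hs.1 hs.2 c, if_pos hmem]]
    ring

theorem pvS_zero (c : Int) : pvS (List.replicate 12 0) c = 0 := by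
  simp only [pvS, pvPCs, List.map_cons, List.map_nil, List.sum_cons, List.sum_nil,
    show pvGet0 (List.replicate 12 (0:Int)) 0 = 0 from by decide,
    show pvGet0 (List.replicate 12 (0:Int)) 1 = 0 from by decide,
    show pvGet0 (List.replicate 12 (0:Int)) 2 = 0 from by decide,
    show pvGet0 (List.replicate 12 (0:Int)) 3 = 0 from by decide,
    show pvGet0 (List.replicate 12 (0:Int)) 4 = 0 from by decide,
    show pvGet0 (List.replicate 12 (0:Int)) 5 = 0 from by decide,
    show pvGet0 (List.replicate 12 (0:Int)) 6 = 0 from by decide,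
    show pvGet0 (List.replicate 12 (0:Int)) 7 = 0 from by decide,
    show pvGet0 (List.replicate 12 (0:Int)) 8 = 0 from by decide,
    show pvGet0 (List.replicate 12 (0:Int)) 9 = 0 from by decide,
    show pvGet0 (List.replicate 12 (0:Int)) 10 = 0 from by decide,
    show pvGet0 (List.replicate 12 (0:Int)) 11 = 0 from by decide,
    mul_zero, add_zero]

theorem score_eq_0 (rc : List Int) : pvScoreA rc 0 = pvS rc 0 := by
  simp only [pvScoreA, pvS, pvPCs]
  rw [show PySem.Set.ofList (pvMajor.map (fun iv => PySem.Int.mod ((0:Int) + iv) 12)) = ([0, 2, 4, 5, 7, 9, 11] : List Int) from by decide]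
  simp only [List.map_cons, List.map_nil, List.sum_cons, List.sum_nil, show pvMult 0 0 = 1 from by decide, show pvMult 1 0 = 0 from by decide, show pvMult 2 0 = 1 from by decide, show pvMult 3 0 = 0 from by decide, show pvMult 4 0 = 1 from by decide, show pvMult 5 0 = 1 from by decide, show pvMult 6 0 = 0 from by decide, show pvMult 7 0 = 1 from by decide, show pvMult 8 0 = 0 from by decide, show pvMult 9 0 = 1 from by decide, show pvMult 10 0 = 0 from by decide, show pvMult 11 0 = 1 from by decide]
  ring

theorem score_eq_1 (rc : List Int) : pvScoreA rc 1 = pvS rc 1 := by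
  simp only [pvScoreA, pvS, pvPCs]
  rw [show PySem.Set.ofList (pvMajor.map (fun iv => PySem.Int.mod ((1:Int) + iv) 12)) = ([1, 3, 5, 6, 8, 10, 0] : List Int) from by decide]
  simp only [List.map_cons, List.map_nil, List.sum_cons, List.sum_nil, show pvMult 0 1 = 1 from by decide, show pvMult 1 1 = 1 from by decide, show pvMult 2 1 = 0 from by decide, show pvMult 3 1 = 1 from by decide, show pvMult 4 1 = 0 from by decide, show pvMult 5 1 = 1 from by decide, show pvMult 6 1 = 1 from by decide, show pvMult 7 1 = 0 from by decide, show pvMult 8 1 = 1 from by decide, show pvMult 9 1 = 0 from by decide, show pvMult 10 1 = 1 from by decide, show pvMult 11 1 = 0 from by decide]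
  ring

theorem score_eq_2 (rc : List Int) : pvScoreA rc 2 = pvS rc 2 := by
  simp only [pvScoreA, pvS, pvPCs]
  rw [show PySem.Set.ofList (pvMajor.map (fun iv => PySem.Int.mod ((2:Int) + iv) 12)) = ([2, 4, 6, 7, 9, 11, 1] : List Int) from by decide]
  simp only [List.map_cons, List.map_nil, List.sum_cons, List.sum_nil, show pvMult 0 2 = 0 from by decide, show pvMult 1 2 = 1 from by decide, show pvMult 2 2 = 1 from by decide, show pvMult 3 2 = 0 from by decide, show pvMult 4 2 = 1 from by decide, show pvMult 5 2 = 0 from by decide, show pvMult 6 2 = 1 from by decide, show pvMult 7 2 = 1 from by decide, show pvMult 8 2 = 0 from by decide, show pvMult 9 2 = 1 from by decide, show pvMult 10 2 = 0 from by decide, show pvMult 11 2 = 1 from by decide]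
  ring

theorem score_eq_3 (rc : List Int) : pvScoreA rc 3 = pvS rc 3 := by
  simp only [pvScoreA, pvS, pvPCs]
  rw [show PySem.Set.ofList (pvMajor.map (fun iv => PySem.Int.mod ((3:Int) + iv) 12)) = ([3, 5, 7, 8, 10, 0, 2] : List Int) from by decide]
  simp only [List.map_cons, List.map_nil, List.sum_cons, List.sum_nil, show pvMult 0 3 = 1 from by decide, show pvMult 1 3 = 0 from by decide, show pvMult 2 3 = 1 from by decide, show pvMult 3 3 = 1 from by decide, show pvMult 4 3 = 0 from by decide, show pvMult 5 3 = 1 from by decide, show pvMult 6 3 = 0 from by decide, show pvMult 7 3 = 1 from by decide, show pvMult 8 3 = 1 from by decide, show pvMult 9 3 = 0 from by decide, show pvMult 10 3 = 1 from by decide, show pvMult 11 3 = 0 from by decide]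
  ring

theorem score_eq_4 (rc : List Int) : pvScoreA rc 4 = pvS rc 4 := by
  simp only [pvScoreA, pvS, pvPCs]
  rw [show PySem.Set.ofList (pvMajor.map (fun iv => PySem.Int.mod ((4:Int) + iv) 12)) = ([4, 6, 8, 9, 11, 1, 3] : List Int) from by decide]
  simp only [List.map_cons, List.map_nil, List.sum_cons, List.sum_nil, show pvMult 0 4 = 0 from by decide, show pvMult 1 4 = 1 from by decide, show pvMult 2 4 = 0 from by decide, show pvMult 3 4 = 1 from by decide, show pvMult 4 4 = 1 from by decide, show pvMult 5 4 = 0 from by decide, show pvMult 6 4 = 1 from by decide, show pvMult 7 4 = 0 from by decide, show pvMult 8 4 = 1 from by decide, show pvMult 9 4 = 1 from by decide, show pvMult 10 4 = 0 from by decide, show pvMult 11 4 = 1 from by decide]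
  ring

theorem score_eq_5 (rc : List Int) : pvScoreA rc 5 = pvS rc 5 := by
  simp only [pvScoreA, pvS, pvPCs]
  rw [show PySem.Set.ofList (pvMajor.map (fun iv => PySem.Int.mod ((5:Int) + iv) 12)) = ([5, 7, 9, 10, 0, 2, 4] : List Int) from by decide]
  simp only [List.map_cons, List.map_nil, List.sum_cons, List.sum_nil, show pvMult 0 5 = 1 from by decide, show pvMult 1 5 = 0 from by decide, show pvMult 2 5 = 1 from by decide, show pvMult 3 5 = 0 from by decide, show pvMult 4 5 = 1 from by decide, show pvMult 5 5 = 1 from by decide, show pvMult 6 5 = 0 from by decide, show pvMult 7 5 = 1 from by decide, show pvMult 8 5 = 0 from by decide, show pvMult 9 5 = 1 from by decide, show pvMult 10 5 = 1 from by decide, show pvMult 11 5 = 0 from by decide]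
  ring

theorem score_eq_6 (rc : List Int) : pvScoreA rc 6 = pvS rc 6 := by
  simp only [pvScoreA, pvS, pvPCs]
  rw [show PySem.Set.ofList (pvMajor.map (fun iv => PySem.Int.mod ((6:Int) + iv) 12)) = ([6, 8, 10, 11, 1, 3, 5] : List Int) from by decide]
  simp only [List.map_cons, List.map_nil, List.sum_cons, List.sum_nil, show pvMult 0 6 = 0 from by decide, show pvMult 1 6 = 1 from by decide, show pvMult 2 6 = 0 from by decide, show pvMult 3 6 = 1 from by decide, show pvMult 4 6 = 0 from by decide, show pvMult 5 6 = 1 from by decide, show pvMult 6 6 = 1 from by decide, show pvMult 7 6 = 0 from by decide, show pvMult 8 6 = 1 from by decide, show pvMult 9 6 = 0 from by decide, show pvMult 10 6 = 1 from by decide, show pvMult 11 6 = 1 from by decide]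
  ring

theorem score_eq_7 (rc : List Int) : pvScoreA rc 7 = pvS rc 7 := by
  simp only [pvScoreA, pvS, pvPCs]
  rw [show PySem.Set.ofList (pvMajor.map (fun iv => PySem.Int.mod ((7:Int) + iv) 12)) = ([7, 9, 11, 0, 2, 4, 6] : List Int) from by decide]
  simp only [List.map_cons, List.map_nil, List.sum_cons, List.sum_nil, show pvMult 0 7 = 1 from by decide, show pvMult 1 7 = 0 from by decide, show pvMult 2 7 = 1 from by decide, show pvMult 3 7 = 0 from by decide, show pvMult 4 7 = 1 from by decide, show pvMult 5 7 = 0 from by decide, show pvMult 6 7 = 1 from by decide, show pvMult 7 7 = 1 from by decide, show pvMult 8 7 = 0 from by decide, show pvMult 9 7 = 1 from by decide, show pvMult 10 7 = 0 from by decide, show pvMult 11 7 = 1 from by decide]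
  ring

theorem score_eq_8 (rc : List Int) : pvScoreA rc 8 = pvS rc 8 := by
  simp only [pvScoreA, pvS, pvPCs]
  rw [show PySem.Set.ofList (pvMajor.map (fun iv => PySem.Int.mod ((8:Int) + iv) 12)) = ([8, 10, 0, 1, 3, 5, 7] : List Int) from by decide]
  simp only [List.map_cons, List.map_nil, List.sum_cons, List.sum_nil, show pvMult 0 8 = 1 from by decide, show pvMult 1 8 = 1 from by decide, show pvMult 2 8 = 0 from by decide, show pvMult 3 8 = 1 from by decide, show pvMult 4 8 = 0 from by decide, show pvMult 5 8 = 1 from by decide, show pvMult 6 8 = 0 from by decide, show pvMult 7 8 = 1 from by decide, show pvMult 8 8 = 1 from by decide, show pvMult 9 8 = 0 from by decide, show pvMult 10 8 = 1 from by decide, show pvMult 11 8 = 0 from by decide]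
  ring

theorem score_eq_9 (rc : List Int) : pvScoreA rc 9 = pvS rc 9 := by
  simp only [pvScoreA, pvS, pvPCs]
  rw [show PySem.Set.ofList (pvMajor.map (fun iv => PySem.Int.mod ((9:Int) + iv) 12)) = ([9, 11, 1, 2, 4, 6, 8] : List Int) from by decide]
  simp only [List.map_cons, List.map_nil, List.sum_cons, List.sum_nil, show pvMult 0 9 = 0 from by decide, show pvMult 1 9 = 1 from by decide, show pvMult 2 9 = 1 from by decide, show pvMult 3 9 = 0 from by decide, show pvMult 4 9 = 1 from by decide, show pvMult 5 9 = 0 from by decide, show pvMult 6 9 = 1 from by decide, show pvMult 7 9 = 0 from by decide, show pvMult 8 9 = 1 from by decide, show pvMult 9 9 = 1 from by decide, show pvMult 10 9 = 0 from by decide, show pvMult 11 9 = 1 from by decide]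
  ring

theorem score_eq_10 (rc : List Int) : pvScoreA rc 10 = pvS rc 10 := by
  simp only [pvScoreA, pvS, pvPCs]
  rw [show PySem.Set.ofList (pvMajor.map (fun iv => PySem.Int.mod ((10:Int) + iv) 12)) = ([10, 0, 2, 3, 5, 7, 9] : List Int) from by decide]
  simp only [List.map_cons, List.map_nil, List.sum_cons, List.sum_nil, show pvMult 0 10 = 1 from by decide, show pvMult 1 10 = 0 from by decide, show pvMult 2 10 = 1 from by decide, show pvMult 3 10 = 1 from by decide, show pvMult 4 10 = 0 from by decide, show pvMult 5 10 = 1 from by decide, show pvMult 6 10 = 0 from by decide, show pvMult 7 10 = 1 from by decide, show pvMult 8 10 = 0 from by decide, show pvMult 9 10 = 1 from by decide, show pvMult 10 10 = 1 from by decide, show pvMult 11 10 = 0 from by decide]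
  ring

theorem score_eq_11 (rc : List Int) : pvScoreA rc 11 = pvS rc 11 := by
  simp only [pvScoreA, pvS, pvPCs]
  rw [show PySem.Set.ofList (pvMajor.map (fun iv => PySem.Int.mod ((11:Int) + iv) 12)) = ([11, 1, 3, 4, 6, 8, 10] : List Int) from by decide]
  simp only [List.map_cons, List.map_nil, List.sum_cons, List.sum_nil, show pvMult 0 11 = 0 from by decide, show pvMult 1 11 = 1 from by decide, show pvMult 2 11 = 0 from by decide, show pvMult 3 11 = 1 from by decide, show pvMult 4 11 = 1 from by decide, show pvMult 5 11 = 0 from by decide, show pvMult 6 11 = 1 from by decide, show pvMult 7 11 = 0 from by decide, show pvMult 8 11 = 1 from by decide, show pvMult 9 11 = 0 from by decide, show pvMult 10 11 = 1 from by decide, show pvMult 11 11 = 1 from by decide]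
  ring

theorem score_eq_S (rc : List Int) (c : Int) (hc0 : 0 ≤ c) (hc1 : c < 12) :
    pvScoreA rc c = pvS rc c := by
  interval_cases c
  · exact score_eq_0 rc
  · exact score_eq_1 rc
  · exact score_eq_2 rc
  · exact score_eq_3 rc
  · exact score_eq_4 rc
  · exact score_eq_5 rc
  · exact score_eq_6 rc
  · exact score_eq_7 rc
  · exact score_eq_8 rc
  · exact score_eq_9 rc
  · exact score_eq_10 rc
  · exact score_eq_11 rc

-- B's fused scores agree with A's per-candidate scores of the final histogram
theorem fused_scores (p : List (String × String)) (hp : Pre_detect_key p)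
    (c : Int) (hc0 : 0 ≤ c) (hc1 : c < 12) :
    pvGet0 (pvFused p).1 c = pvScoreA (pvCountsA p) c := by
  rw [pvFused, fused_fst p hp _ _ (by simp) c hc0 hc1,
    score_eq_S _ c hc0 hc1, pvCountsA, S_counts p _ (by simp) c, pvS_zero,
    show pvGet0 (List.replicate 12 (0:Int)) c = 0 from by
      rw [pvGet0, PySem.List.pyGetD_eq_getElem _ _ hc0 (by simp; omega)]
      simp only [List.getElem_replicate]]

theorem get0_nonneg (rc : List Int) (h : ∀ x ∈ rc, 0 ≤ x) (i : Int) : 0 ≤ pvGet0 rc i := by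
  rw [pvGet0]
  rcases hg : PySem.List.pyGet? rc i with _ | x
  · simp [PySem.List.pyGetD, hg]
  · have := PySem.List.mem_of_pyGet?_eq_some rc hg
    simp [PySem.List.pyGetD, hg]
    exact h x this

theorem counts_nonneg_aux (l : List (String × String)) (rc : List Int) (h : ∀ x ∈ rc, 0 ≤ x) :
    ∀ x ∈ l.foldl
      (fun rc rs => PySem.List.pySetD rc (pvSemi rs.1) (pvGet0 rc (pvSemi rs.1) + 1)) rc, 0 ≤ x := by
  induction l generalizing rc with
  | nil => exact h
  | cons rs l ih =>
    simp only [List.foldl_cons]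
    refine ih _ ?_
    intro x hx
    rw [PySem.List.pySetD_of_nonneg _ _ (semi_bounds rs.1).1] at hx
    rcases List.mem_or_eq_of_mem_set hx with hx | rfl
    · exact h x hx
    · have := get0_nonneg rc h (pvSemi rs.1); omega

theorem counts_nonneg (p : List (String × String)) : ∀ x ∈ pvCountsA p, 0 ≤ x := by
  refine counts_nonneg_aux p _ ?_
  intro x hx
  simp only [List.mem_replicate] at hx
  omega

theorem score_nonneg (rc : List Int) (h : ∀ x ∈ rc, 0 ≤ x) (c : Int) : 0 ≤ pvScoreA rc c := by
  rw [pvScoreA]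
  apply List.sum_nonneg
  intro x hx
  rcases List.mem_map.mp hx with ⟨pc, _, rfl⟩
  exact get0_nonneg rc h pc

-- A's (best_key, best_score) fold is the plain first-maximizer fold once the score is a function
theorem sel_fold (f g : Int → Int) (l : List Int) (k : Int) :
    (l.foldl (fun (st : Int × Int) c =>
        if f c > st.2 ∨ (f c = st.2 ∧ g c > g st.1) then (c, f c) else st) (k, f k))
    = (l.foldl (fun b c => if f c > f b ∨ (f c = f b ∧ g c > g b) then c else b) k,
       f (l.foldl (fun b c => if f c > f b ∨ (f c = f b ∧ g c > g b) then c else b) k)) := by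
  induction l generalizing k with
  | nil => rfl
  | cons c l ih =>
    simp only [List.foldl_cons]
    by_cases h : f c > f k ∨ (f c = f k ∧ g c > g k)
    · rw [if_pos h, if_pos h]; exact ih c
    · rw [if_neg h, if_neg h]; exact ih k

theorem foldB_congr (f f' g : Int → Int) (hf : ∀ c, 0 ≤ c → c < 12 → f c = f' c)
    (l : List Int) :
    ∀ (hl : ∀ c ∈ l, 0 ≤ c ∧ c < 12) (k : Int) (hk0 : 0 ≤ k) (hk1 : k < 12),
    l.foldl (fun b c => if f c > f b ∨ (f c = f b ∧ g c > g b) then c else b) k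
    = l.foldl (fun b c => if f' c > f' b ∨ (f' c = f' b ∧ g c > g b) then c else b) k := by
  induction l with
  | nil => intros; rfl
  | cons c l ih =>
    intro hl k hk0 hk1
    have hc := hl c (List.mem_cons_self ..)
    simp only [List.foldl_cons]
    by_cases h : f' c > f' k ∨ (f' c = f' k ∧ g c > g k)
    · rw [if_pos (by rw [hf c hc.1 hc.2, hf k hk0 hk1]; exact h), if_pos h]
      exact ih (fun x hx => hl x (List.mem_cons_of_mem _ hx)) c hc.1 hc.2
    · rw [if_neg (by rw [hf c hc.1 hc.2, hf k hk0 hk1]; exact h), if_neg h]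
      exact ih (fun x hx => hl x (List.mem_cons_of_mem _ hx)) k hk0 hk1

-- ===== VERDICT (by name: the statement is the Claim_ definition above) =====
set_option maxRecDepth 8192 in
theorem detect_key_spec : Claim_equal_detect_key := by
  intro p _ hp
  show detect_key p = detect_key_alt p
  simp only [detect_key, detect_key_alt]
  rw [pvFused, fused_snd p]
  have hnn := counts_nonneg p
  rw [show PySem.List.pyRange 0 12 1 = 0 :: PySem.List.pyRange 1 12 1 from by decide]
  simp only [List.foldl_cons]
  rw [if_pos (Or.inl (by have := score_nonneg (pvCountsA p) hnn 0; simp; omega))]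
  rw [sel_fold (pvScoreA (pvCountsA p)) (pvGet0 (pvCountsA p)) (PySem.List.pyRange 1 12 1) 0]
  refine congrArg (fun b => PySem.List.pyGetD pvNoteNames b "") ?_
  exact foldB_congr (pvScoreA (pvCountsA p)) (fun c => pvGet0 (pvFused p).1 c)
    (pvGet0 (pvCountsA p))
    (fun c hc0 hc1 => (fused_scores p hp c hc0 hc1).symm)
    (PySem.List.pyRange 1 12 1)
    (fun c hc => by have := (PySem.List.mem_pyRange_one).mp hc; omega)
    0 (by omega) (by omega)
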